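-- pv_equiv track=rewrite | github.com/tejasvmittal/Simple-Columns-game | game_mechanics.py | shift_down
-- ===== SOURCE A (Python) =====
-- def shift_down(board) -> list:
--     """Check if there is a hole below to move all the content below."""
--     while check_below(board) == False:
--         for r in range(len(board)-1):
--             for c in range(len(board[0])):
--                 if (board[r][c] != ' ') and (board[r + 1][c] == ' '):
--                     val = board[r][c]
--                     board[r][c] = ' '
--                     board[r + 1][c] = val
--     return board
--
-- def check_below(board: list) -> bool:
--     """Check if there is an empty space below every element."""
--     result = True
--     for r in range(len(board) - 1):
--         for c in range(len(board[0])):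
--             if (board[r][c] != ' ') and (board[r + 1][c] == ' '):
--                 result = False
--     return result
-- ===== SOURCE B (Python) =====
-- def shift_down(board) -> list:
--     """Apply gravity per column in one pass: collect the non-space values of
--     each column and rewrite the column bottom-aligned (mutates board in place,
--     like the original)."""
--     if not board:
--         return board
--     rows = len(board)
--     cols = len(board[0])
--     for c in range(cols):
--         vals = [row[c] for row in board if row[c] != ' ']
--         pad = rows - len(vals)
--         for r in range(rows):
--             board[r][c] = ' ' if r < pad else vals[r - pad]
--     return board
-- ===== Notes on version B (the rewrite author's own statement) =====
-- stated objective: alternative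
-- what changed: Replaces the fixpoint of repeated full-board bubble passes (while not settled: sweep all cells, moving each value one row down) by a single direct per-column pass that collects the non-space values and rewrites the column bottom-aligned.
-- outside the precondition, e.g. on shift_down([[' '], []]): A returns [[' '], []], B raises IndexError
import Mathlib
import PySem

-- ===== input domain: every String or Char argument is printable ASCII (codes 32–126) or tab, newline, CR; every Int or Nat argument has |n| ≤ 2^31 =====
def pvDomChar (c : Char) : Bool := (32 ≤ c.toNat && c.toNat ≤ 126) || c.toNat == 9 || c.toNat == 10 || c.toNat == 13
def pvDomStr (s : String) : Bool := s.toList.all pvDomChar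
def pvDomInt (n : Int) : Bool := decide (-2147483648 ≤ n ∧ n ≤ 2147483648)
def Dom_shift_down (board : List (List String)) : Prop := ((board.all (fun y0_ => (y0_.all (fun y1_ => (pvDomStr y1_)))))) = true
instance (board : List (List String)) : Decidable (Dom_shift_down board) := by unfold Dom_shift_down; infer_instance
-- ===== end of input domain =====

-- B replaces A's repeated full-board bubble passes by one bottom-aligned rewrite per
-- column. Both Pythons mutate `board` in place and return it; the equivalence proved
-- here is about the returned value.

-- ===== PORT A =====
-- board[r][c] (indices come from range(), hence naturals; total via defaults, exact
-- wherever the Python indexing does not raise)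

def cellGet (b : List (List String)) (r c : Nat) : String := (b.getD r []).getD c " "

def cellSet (b : List (List String)) (r c : Nat) (v : String) : List (List String) :=
  b.modify r (fun row => row.set c v)

def condAt (b : List (List String)) (r c : Nat) : Bool :=
  cellGet b r c != " " && cellGet b (r + 1) c == " "

def passStep (b : List (List String)) (r c : Nat) : List (List String) :=
  if condAt b r c then cellSet (cellSet b r c " ") (r + 1) c (cellGet b r c) else b

def pass1 (b : List (List String)) : List (List String) :=
  (List.range (b.length - 1)).foldl (fun b' r =>
    (List.range (b'.headD []).length).foldl (fun b'' c => passStep b'' r c) b') b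

def check_below (b : List (List String)) : Bool :=
  (List.range (b.length - 1)).foldl (fun result r =>
    (List.range (b.headD []).length).foldl (fun result c =>
      if condAt b r c then false else result) result) true

-- while check_below(board) == False: sweep.  The while-loop is run on structural fuel;
-- `potential board + 1` sweeps always suffice (each sweep that runs strictly decreases
-- `potential`, theorem pass1_potential_lt below), so the fuel case 0 is never reached
-- on any input.
def shiftLoop : Nat → List (List String) → List (List String)
  | 0, b => b
  | fuel + 1, b => if check_below b then b else shiftLoop fuel (pass1 b)

-- the number of sweeps the while-loop may still need: every non-space cell among the
-- first len(board[0]) columns weighs its distance to the bottom row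
def potential (b : List (List String)) : Nat :=
  ((List.range b.length).map (fun r =>
    ((List.range (b.headD []).length).map (fun c =>
      if cellGet b r c ≠ " " then b.length - 1 - r else 0)).sum)).sum

def shift_down (board : List (List String)) : List (List String) :=
  shiftLoop (potential board + 1) board

-- ===== PORT B =====
-- vals = [row[c] for row in board if row[c] != ' ']

def colVals (b : List (List String)) (c : Nat) : List String :=
  b.filterMap (fun row => if row.getD c " " ≠ " " then some (row.getD c " ") else none)

def shift_down_alt (board : List (List String)) : List (List String) :=
  if board = [] then board
  else
    let rows := board.length
    let cols := (board.headD []).length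
    (List.range cols).foldl (fun b c =>
      let vals := colVals b c
      let pad := rows - vals.length
      (List.range rows).foldl (fun b' r =>
        b'.modify r (fun row => row.set c (if r < pad then " " else vals.getD (r - pad) " "))) b)
      board

-- ===== PRECONDITION & SPEC =====
-- Pre_ restricts to boards whose every row is at least as long as the first row (every
-- rectangular game grid qualifies). On a board with a shorter row A either raises
-- IndexError or, thanks to `and` short-circuiting, returns a value computed while
-- silently skipping the cells it cannot read, whereas B reads every row at each column
-- of the first row and raises IndexError there.
def Pre_shift_down (board : List (List String)) : Prop :=
  ∀ row ∈ board, (board.headD []).length ≤ row.length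
instance (board : List (List String)) : Decidable (Pre_shift_down board) := by
  unfold Pre_shift_down; infer_instance
def pvWitness_shift_down : List (List String) := [["x"], [" "]]
def Spec_shift_down (board : List (List String)) (out : List (List String)) : Prop :=
  out = shift_down_alt board
instance (board : List (List String)) (out : List (List String)) : Decidable (Spec_shift_down board out) := by unfold Spec_shift_down; infer_instance

-- ===== CLAIM (what is proved, stated in full; the proofs are below) =====
def Claim_equal_shift_down : Prop := ∀ (board : List (List String)), Dom_shift_down board → Pre_shift_down board → Spec_shift_down board (shift_down board)

-- ===== LEMMAS AND PROOFS =====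

def shape (b : List (List String)) : Nat × List Nat := (b.length, b.map (·.length))

theorem shape_cellSet (b : List (List String)) (r c : Nat) (v : String) :
    shape (cellSet b r c v) = shape b := by
  unfold shape cellSet
  refine Prod.ext (by simp) ?_
  apply List.ext_getElem? (fun j => ?_)
  simp [List.getElem?_modify]
  cases h : b[j]? <;> simp [Option.map]
  split <;> simp

theorem shape_passStep (b : List (List String)) (r c : Nat) :
    shape (passStep b r c) = shape b := by
  unfold passStep; split
  · rw [shape_cellSet, shape_cellSet]
  · rfl

theorem length_of_shape_eq {b b' : List (List String)} (h : shape b' = shape b) :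
    b'.length = b.length := congrArg Prod.fst h

theorem rowlen_of_shape_eq {b b' : List (List String)} (h : shape b' = shape b) (j : Nat) :
    (b'.getD j []).length = (b.getD j []).length := by
  have h2 := congrArg Prod.snd h
  simp only [shape] at h2
  have h3 := congrArg (fun l => (l.getD j 0 : Nat)) h2
  simp only [List.getD, List.getElem?_map] at h3
  cases hb : b[j]? <;> cases hb' : b'[j]? <;> simp [hb, hb'] at h3 ⊢ <;> simp [h3]

theorem headlen_of_shape_eq {b b' : List (List String)} (h : shape b' = shape b) :
    (b'.headD []).length = (b.headD []).length := by
  have h0 := rowlen_of_shape_eq h 0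
  simpa [List.getD, ← List.head?_eq_getElem?] using h0

theorem cellGet_cellSet_ne (b : List (List String)) {r c r' c' : Nat} (v : String)
    (h : r' ≠ r ∨ c' ≠ c) :
    cellGet (cellSet b r c v) r' c' = cellGet b r' c' := by
  unfold cellGet cellSet
  rcases h with h | h
  · simp [List.getD, Ne.symm h]
  · simp only [List.getD, List.getElem?_modify]
    cases hb : b[r']? <;> simp
    split
    · simp [List.getElem?_set_ne (by omega : c ≠ c')]
    · rfl

theorem cellGet_cellSet_self (b : List (List String)) {r c : Nat} (v : String)
    (hr : r < b.length) (hc : c < (b.getD r []).length) :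
    cellGet (cellSet b r c v) r c = v := by
  unfold cellGet cellSet
  have hb : b[r]? = some b[r] := List.getElem?_eq_getElem hr
  have hc' : c < (b[r]).length := by simpa [List.getD, hb] using hc
  simp only [List.getD, List.getElem?_modify, hb]
  simp [hc']

theorem sum_map_range (f : Nat → Nat) (n : Nat) :
    ((List.range n).map f).sum = ∑ i ∈ Finset.range n, f i := by
  induction n with
  | zero => simp
  | succ n ih => simp [List.range_succ, Finset.sum_range_succ, ih]

theorem potential_eq (b : List (List String)) :
    potential b = ∑ r ∈ Finset.range b.length, ∑ c ∈ Finset.range (b.headD []).length,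
      (if cellGet b r c ≠ " " then b.length - 1 - r else 0) := by
  unfold potential
  rw [sum_map_range]
  exact Finset.sum_congr rfl (fun r _ => by rw [sum_map_range])

-- core two-cell comparison

theorem potential_lt_of_swap {b b' : List (List String)} {r c : Nat}
    (hs : shape b' = shape b) (hr : r + 1 < b.length) (hc : c < (b.headD []).length)
    (hother : ∀ r' c', r' < b.length → c' < (b.headD []).length →
      ¬(r' = r ∧ c' = c) → ¬(r' = r + 1 ∧ c' = c) → cellGet b' r' c' = cellGet b r' c')
    (hb : cellGet b r c ≠ " ") (hb' : cellGet b' r c = " ")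
    (hdown : cellGet b (r + 1) c = " ") :
    potential b' < potential b := by
  have hlen := length_of_shape_eq hs
  have hhead := headlen_of_shape_eq hs
  rw [potential_eq, potential_eq, hlen, hhead]
  set rows := b.length with hrows
  set cols := (b.headD []).length with hcols
  set f : Nat → Nat → Nat := fun r' c' => if cellGet b r' c' ≠ " " then rows - 1 - r' else 0 with hf
  set g : Nat → Nat → Nat := fun r' c' => if cellGet b' r' c' ≠ " " then rows - 1 - r' else 0 with hg
  -- inner sums
  have hrmem : r ∈ Finset.range rows := Finset.mem_range.2 (by omega)
  have hr1mem : r + 1 ∈ Finset.range rows := Finset.mem_range.2 hr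
  have hcmem : c ∈ Finset.range cols := Finset.mem_range.2 hc
  have inner_r : ∑ c' ∈ Finset.range cols, f r c' = (rows - 1 - r) + ∑ c' ∈ Finset.range cols, g r c' := by
    rw [← Finset.add_sum_erase _ _ hcmem, ← Finset.add_sum_erase _ _ hcmem]
    have : f r c = rows - 1 - r := by simp [hf, hb]
    have hg0 : g r c = 0 := by simp [hg, hb']
    rw [this, hg0]
    have : ∑ c' ∈ (Finset.range cols).erase c, f r c' = ∑ c' ∈ (Finset.range cols).erase c, g r c' := by
      refine Finset.sum_congr rfl (fun c' hc' => ?_)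
      have hcc : c' ≠ c := Finset.ne_of_mem_erase hc'
      have hclt : c' < cols := Finset.mem_range.1 (Finset.mem_of_mem_erase hc')
      simp only [hf, hg, hother r c' (by omega) hclt (by simp [hcc]) (by omega)]
    omega
  have inner_r1 : ∑ c' ∈ Finset.range cols, g (r+1) c' ≤ (rows - 1 - (r+1)) + ∑ c' ∈ Finset.range cols, f (r+1) c' := by
    rw [← Finset.add_sum_erase _ _ hcmem, ← Finset.add_sum_erase _ _ hcmem]
    have hf0 : f (r+1) c = 0 := by simp [hf, hdown]
    have hgle : g (r+1) c ≤ rows - 1 - (r+1) := by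
      simp only [hg]; split <;> omega
    have heq : ∑ c' ∈ (Finset.range cols).erase c, g (r+1) c' = ∑ c' ∈ (Finset.range cols).erase c, f (r+1) c' := by
      refine Finset.sum_congr rfl (fun c' hc' => ?_)
      have hcc : c' ≠ c := Finset.ne_of_mem_erase hc'
      have hclt : c' < cols := Finset.mem_range.1 (Finset.mem_of_mem_erase hc')
      simp only [hf, hg, hother (r+1) c' (by omega) hclt (by omega) (by simp [hcc])]
    omega
  -- outer split
  have hsplit : ∀ (h : Nat → Nat → Nat), ∑ r' ∈ Finset.range rows, ∑ c' ∈ Finset.range cols, h r' c' =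
      (∑ c' ∈ Finset.range cols, h r c') + (∑ c' ∈ Finset.range cols, h (r+1) c')
      + ∑ r' ∈ ((Finset.range rows).erase r).erase (r+1), ∑ c' ∈ Finset.range cols, h r' c' := by
    intro h
    rw [← Finset.add_sum_erase _ _ hrmem]
    have hr1mem' : r + 1 ∈ (Finset.range rows).erase r := Finset.mem_erase.2 ⟨by omega, hr1mem⟩
    rw [← Finset.add_sum_erase _ _ hr1mem']
    ring
  have hrest : ∑ r' ∈ ((Finset.range rows).erase r).erase (r+1), ∑ c' ∈ Finset.range cols, g r' c'
      = ∑ r' ∈ ((Finset.range rows).erase r).erase (r+1), ∑ c' ∈ Finset.range cols, f r' c' := by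
    refine Finset.sum_congr rfl (fun r' hr' => Finset.sum_congr rfl (fun c' hc' => ?_))
    have h1 : r' ≠ r + 1 := (Finset.mem_erase.1 hr').1
    have h2 : r' ≠ r := (Finset.mem_erase.1 (Finset.mem_erase.1 hr').2).1
    have h3 : r' < rows := Finset.mem_range.1 (Finset.mem_of_mem_erase (Finset.mem_of_mem_erase hr'))
    simp only [hf, hg, hother r' c' h3 (Finset.mem_range.1 hc') (by omega) (by omega)]
  rw [hsplit f, hsplit g, hrest]
  omega

theorem cellGet_default_of_ge (b : List (List String)) {r : Nat} (c : Nat) (h : b.length ≤ r) :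
    cellGet b r c = " " := by
  unfold cellGet
  have hnil : b.getD r [] = [] := by
    rw [List.getD_eq_getElem?_getD, List.getElem?_eq_none (by omega)]; rfl
  rw [hnil]; rfl

theorem potential_passStep_lt (b : List (List String)) {r c : Nat}
    (hr : r + 1 < b.length) (hc : c < (b.headD []).length) (ht : condAt b r c = true) :
    potential (passStep b r c) < potential b := by
  have hb : cellGet b r c ≠ " " := by
    simp only [condAt, Bool.and_eq_true, bne_iff_ne, beq_iff_eq] at ht; exact ht.1
  have hdown : cellGet b (r + 1) c = " " := by
    simp only [condAt, Bool.and_eq_true, bne_iff_ne, beq_iff_eq] at ht; exact ht.2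
  have hcrow : c < (b.getD r []).length := by
    by_contra hge
    apply hb
    unfold cellGet
    rw [List.getD_eq_getElem?_getD (l := b.getD r []), List.getElem?_eq_none (by omega)]
    rfl
  have hstep : passStep b r c = cellSet (cellSet b r c " ") (r + 1) c (cellGet b r c) := by
    unfold passStep; rw [if_pos ht]
  have hs1 : shape (cellSet b r c " ") = shape b := shape_cellSet ..
  have hs : shape (passStep b r c) = shape b := shape_passStep ..
  rw [hstep] at hs ⊢
  refine potential_lt_of_swap hs hr hc (fun r' c' _ _ h1 h2 => ?_) hb ?_ hdown
  · rw [cellGet_cellSet_ne _ _ (by tauto), cellGet_cellSet_ne _ _ (by tauto)]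
  · rw [cellGet_cellSet_ne _ _ (by omega), cellGet_cellSet_self _ _ (by omega) hcrow]

theorem potential_passStep_le (b : List (List String)) {r c : Nat}
    (hr : r + 1 < b.length) (hc : c < (b.headD []).length) :
    potential (passStep b r c) ≤ potential b := by
  by_cases ht : condAt b r c = true
  · exact le_of_lt (potential_passStep_lt b hr hc ht)
  · unfold passStep; rw [if_neg ht]

theorem passStep_eq_of_not_cond (b : List (List String)) {r c : Nat}
    (ht : ¬ condAt b r c = true) : passStep b r c = b := by
  unfold passStep; rw [if_neg ht]

def doSwaps (ps : List (Nat × Nat)) (b : List (List String)) : List (List String) :=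
  ps.foldl (fun b p => passStep b p.1 p.2) b

theorem shape_doSwaps (ps : List (Nat × Nat)) (b : List (List String)) :
    shape (doSwaps ps b) = shape b := by
  induction ps generalizing b with
  | nil => rfl
  | cons p ps ih =>
    show shape (doSwaps ps (passStep b p.1 p.2)) = shape b
    rw [ih, shape_passStep]

theorem potential_doSwaps_le (ps : List (Nat × Nat)) (b : List (List String))
    (hps : ∀ p ∈ ps, p.1 + 1 < b.length ∧ p.2 < (b.headD []).length) :
    potential (doSwaps ps b) ≤ potential b := by
  induction ps generalizing b with
  | nil => exact le_rfl
  | cons p ps ih =>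
    simp only [doSwaps, List.foldl_cons] at *
    have hp := hps p (by simp)
    have hsh := shape_passStep b p.1 p.2
    refine le_trans (ih (passStep b p.1 p.2) (fun q hq => ?_)) (potential_passStep_le b hp.1 hp.2)
    have := hps q (by simp [hq])
    rw [length_of_shape_eq hsh, headlen_of_shape_eq hsh]
    exact this

theorem doSwaps_eq_of_potential_eq (ps : List (Nat × Nat)) (b : List (List String))
    (hps : ∀ p ∈ ps, p.1 + 1 < b.length ∧ p.2 < (b.headD []).length)
    (hpot : potential (doSwaps ps b) = potential b) : doSwaps ps b = b := by
  induction ps generalizing b with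
  | nil => rfl
  | cons p ps ih =>
    simp only [doSwaps, List.foldl_cons] at *
    have hp := hps p (by simp)
    have hsh := shape_passStep b p.1 p.2
    have hps' : ∀ q ∈ ps, q.1 + 1 < (passStep b p.1 p.2).length ∧ q.2 < ((passStep b p.1 p.2).headD []).length := by
      intro q hq
      rw [length_of_shape_eq hsh, headlen_of_shape_eq hsh]
      exact hps q (by simp [hq])
    have hle := potential_doSwaps_le ps (passStep b p.1 p.2) hps'
    have hcond : ¬ condAt b p.1 p.2 = true := by
      intro hcond
      have := potential_passStep_lt b hp.1 hp.2 hcond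
      simp only [doSwaps] at hle
      omega
    rw [passStep_eq_of_not_cond b hcond] at *
    exact ih b (fun q hq => hps q (by simp [hq])) hpot

def pairs (b : List (List String)) : List (Nat × Nat) :=
  (List.range (b.length - 1)).flatMap (fun r =>
    (List.range (b.headD []).length).map (fun c => (r, c)))

theorem headlen_foldl_passStep (l : List Nat) (b : List (List String)) (r : Nat) :
    ((List.foldl (fun b'' c => passStep b'' r c) b l).headD []).length = (b.headD []).length := by
  induction l generalizing b with
  | nil => rfl
  | cons c l ih =>
    simp only [List.foldl_cons]
    rw [ih, headlen_of_shape_eq (shape_passStep b r c)]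

theorem pass1_eq_doSwaps (b : List (List String)) : pass1 b = doSwaps (pairs b) b := by
  unfold pass1 pairs doSwaps
  rw [List.foldl_flatMap]
  have : ∀ (rs : List Nat) (b0 : List (List String)),
      (b0.headD []).length = (b.headD []).length →
      List.foldl (fun b' r => (List.range (b'.headD []).length).foldl (fun b'' c => passStep b'' r c) b') b0 rs
      = List.foldl (fun b' r => List.foldl (fun x y => passStep x y.1 y.2) b' ((List.range (b.headD []).length).map (fun c => (r, c)))) b0 rs := by
    intro rs
    induction rs with
    | nil => intro b0 _; rfl
    | cons r rs ih =>
      intro b0 hb0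
      simp only [List.foldl_cons]
      rw [List.foldl_map, hb0]
      exact ih _ (by rw [headlen_foldl_passStep]; exact hb0)
  exact this _ b rfl

theorem foldl_if_false {α : Type} (l : List α) (q : α → Bool) (res : Bool) :
    List.foldl (fun acc x => if q x then false else acc) res l = (res && !(l.any q)) := by
  induction l generalizing res with
  | nil => simp
  | cons x l ih =>
    simp only [List.foldl_cons, List.any_cons]
    by_cases h : q x = true
    · rw [if_pos h, ih, h]; simp
    · rw [if_neg h, ih]
      have h' : q x = false := by simpa using h
      simp [h']

theorem foldl_and (l : List Nat) (g : Nat → Bool) (res : Bool) :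
    List.foldl (fun acc r => (acc && !(g r))) res l = (res && l.all (fun r => !(g r))) := by
  induction l generalizing res with
  | nil => simp
  | cons x l ih => simp [List.foldl_cons, ih, Bool.and_assoc]

theorem check_below_eq_false_iff (b : List (List String)) :
    check_below b = false ↔ ∃ p ∈ pairs b, condAt b p.1 p.2 = true := by
  unfold check_below
  have hfun : (fun (result : Bool) r => (List.range (b.headD []).length).foldl (fun result c => if condAt b r c then false else result) result)
      = (fun (result : Bool) r => result && !((List.range (b.headD []).length).any (fun c => condAt b r c))) := by
    funext res r; rw [foldl_if_false]
  rw [hfun, foldl_and]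
  simp only [Bool.true_and]
  rw [List.all_eq_false]
  constructor
  · rintro ⟨r, hr, hq⟩
    have hq' : ((List.range (b.headD []).length).any fun c => condAt b r c) = true := by
      simpa using hq
    obtain ⟨c, hc, hcond⟩ := List.any_eq_true.1 hq'
    refine ⟨(r, c), ?_, hcond⟩
    simp only [pairs, List.mem_flatMap, List.mem_map]
    exact ⟨r, hr, ⟨c, hc, rfl⟩⟩
  · rintro ⟨p, hp, hcond⟩
    simp only [pairs, List.mem_flatMap, List.mem_map] at hp
    obtain ⟨r, hr, c, hc, rfl⟩ := hp
    refine ⟨r, hr, ?_⟩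
    simp only [Bool.not_eq_true', Bool.not_eq_false]
    exact List.any_eq_true.2 ⟨c, hc, hcond⟩

theorem pass1_potential_lt (b : List (List String)) (h : ¬ check_below b = true) :
    potential (pass1 b) < potential b := by
  have hfalse : check_below b = false := by simpa using h
  obtain ⟨p, hpmem, hpcond⟩ := (check_below_eq_false_iff b).1 hfalse
  have hbounds : ∀ q ∈ pairs b, q.1 + 1 < b.length ∧ q.2 < (b.headD []).length := by
    intro q hq
    simp only [pairs, List.mem_flatMap, List.mem_map, List.mem_range] at hq
    obtain ⟨r, hr, c, hc, rfl⟩ := hq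
    exact ⟨by omega, hc⟩
  obtain ⟨l1, l2, hsplit⟩ := List.append_of_mem hpmem
  rw [pass1_eq_doSwaps, hsplit]
  have hb1 : ∀ q ∈ l1, q.1 + 1 < b.length ∧ q.2 < (b.headD []).length :=
    fun q hq => hbounds q (by rw [hsplit]; simp [hq])
  set b1 := doSwaps l1 b with hb1def
  have hsh1 : shape b1 = shape b := shape_doSwaps l1 b
  have hfold : doSwaps (l1 ++ p :: l2) b = doSwaps l2 (passStep b1 p.1 p.2) := by
    rw [hb1def]; unfold doSwaps; rw [List.foldl_append, List.foldl_cons]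
  rw [hfold]
  have hple := hbounds p (by rw [hsplit]; simp)
  have hple1 : p.1 + 1 < b1.length ∧ p.2 < (b1.headD []).length := by
    rw [length_of_shape_eq hsh1, headlen_of_shape_eq hsh1]; exact hple
  have hsh2 : shape (passStep b1 p.1 p.2) = shape b := by rw [shape_passStep, hsh1]
  have hb2 : ∀ q ∈ l2, q.1 + 1 < (passStep b1 p.1 p.2).length ∧ q.2 < ((passStep b1 p.1 p.2).headD []).length := by
    intro q hq
    rw [length_of_shape_eq hsh2, headlen_of_shape_eq hsh2]
    exact hbounds q (by rw [hsplit]; simp [hq])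
  have hstep_le := potential_doSwaps_le l2 _ hb2
  have hle1 : potential b1 ≤ potential b := potential_doSwaps_le l1 b hb1
  rcases lt_or_eq_of_le hle1 with hlt | heq
  · have := potential_passStep_le b1 hple1.1 hple1.2
    omega
  · have hb1b : b1 = b := doSwaps_eq_of_potential_eq l1 b hb1 heq
    have hcond1 : condAt b1 p.1 p.2 = true := by rw [hb1b]; exact hpcond
    have := potential_passStep_lt b1 hple1.1 hple1.2 hcond1
    omega



theorem cellGet_eq (b : List (List String)) (j c : Nat) :
    cellGet b j c = (b[j]?.getD [])[c]?.getD " " := rfl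

def colList (b : List (List String)) (c : Nat) : List String :=
  b.map (fun row => row.getD c " ")

theorem colList_getD (b : List (List String)) (c j : Nat) :
    (colList b c).getD j " " = cellGet b j c := by
  unfold colList cellGet
  by_cases hj : j < b.length
  · rw [List.getD_eq_getElem _ _ (by simpa using hj), List.getElem_map,
      List.getD_eq_getElem _ _ hj]
  · rw [List.getD_eq_getElem?_getD, List.getElem?_eq_none (by simpa using hj),
      List.getD_eq_getElem?_getD (l := b), List.getElem?_eq_none (by omega)]
    rfl

theorem colVals_eq_filter (b : List (List String)) (c : Nat) :
    colVals b c = (colList b c).filter (fun v => v ≠ " ") := by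
  unfold colVals colList
  induction b with
  | nil => rfl
  | cons row b ih =>
    simp only [List.filterMap_cons, List.map_cons, List.filter_cons, List.getD] at *
    simp only [ne_eq, ite_not, decide_not] at ih
    by_cases h : row[c]?.getD " " = " "
    · simp [h, ih]
    · simp [h, ih]

-- two boards are equal iff same length, same row lengths, same cells

theorem board_ext {b1 b2 : List (List String)}
    (hlen : b1.length = b2.length)
    (hrow : ∀ j, (b1.getD j []).length = (b2.getD j []).length)
    (hcell : ∀ j c, cellGet b1 j c = cellGet b2 j c) : b1 = b2 := by
  apply List.ext_getElem hlen
  intro j hj1 hj2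
  apply List.ext_getElem
  · have := hrow j
    rwa [List.getD_eq_getElem _ _ hj1, List.getD_eq_getElem _ _ hj2] at this
  intro c hc1 hc2
  have := hcell j c
  unfold cellGet at this
  rwa [List.getD_eq_getElem _ _ hj1, List.getD_eq_getElem _ _ hj2,
    List.getD_eq_getElem _ _ hc1, List.getD_eq_getElem _ _ hc2] at this

def colWrite (b : List (List String)) (c : Nat) (f : Nat → String) (m : Nat) : List (List String) :=
  (List.range m).foldl (fun b' r => b'.modify r (fun row => row.set c (f r))) b

theorem colWrite_getElem? (b : List (List String)) (c : Nat) (f : Nat → String) (m j : Nat) :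
    (colWrite b c f m)[j]? = if j < m then b[j]?.map (fun row => row.set c (f j)) else b[j]? := by
  induction m with
  | zero => simp [colWrite]
  | succ m ih =>
    unfold colWrite at *
    rw [List.range_succ, List.foldl_append, List.foldl_cons, List.foldl_nil]
    rw [List.getElem?_modify, ih]
    rcases Nat.lt_trichotomy j m with hlt | heq | hgt
    · rw [if_pos hlt, if_pos (by omega)]
      cases hb : b[j]? <;> simp [show ¬ (m = j) by omega]
    · subst heq
      rw [if_neg (by omega), if_pos (by omega)]
      cases hb : b[j]? <;> simp
    · rw [if_neg (by omega), if_neg (by omega)]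
      cases hb : b[j]? <;> simp [show ¬ (m = j) by omega]

theorem length_colWrite (b : List (List String)) (c : Nat) (f : Nat → String) (m : Nat) :
    (colWrite b c f m).length = b.length := by
  have h1 := colWrite_getElem? b c f m
  by_contra hne
  rcases Nat.lt_or_ge (colWrite b c f m).length b.length with hlt | hge
  · have := h1 (colWrite b c f m).length
    rw [List.getElem?_eq_none (le_refl _)] at this
    have h2 : b[(colWrite b c f m).length]? = some b[(colWrite b c f m).length] := List.getElem?_eq_getElem hlt
    split at this <;> simp [h2] at this
  · have hlt : b.length < (colWrite b c f m).length := by omega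
    have := h1 b.length
    rw [List.getElem?_eq_getElem hlt, List.getElem?_eq_none (le_refl _)] at this
    split at this <;> simp at this

theorem rowlen_colWrite (b : List (List String)) (c : Nat) (f : Nat → String) (m j : Nat) :
    ((colWrite b c f m).getD j []).length = (b.getD j []).length := by
  rw [List.getD_eq_getElem?_getD, List.getD_eq_getElem?_getD, colWrite_getElem?]
  split
  · cases h : b[j]? <;> simp
  · rfl

theorem cellGet_colWrite_ne (b : List (List String)) (c : Nat) (f : Nat → String) (m j c' : Nat)
    (h : c' ≠ c) : cellGet (colWrite b c f m) j c' = cellGet b j c' := by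
  rw [cellGet_eq, cellGet_eq, colWrite_getElem?]
  split
  · cases hb : b[j]? with
    | none => rfl
    | some row =>
      simp only [Option.map_some, Option.getD_some]
      rw [List.getElem?_set_ne (Ne.symm h)]
  · rfl

theorem cellGet_colWrite_self (b : List (List String)) (c : Nat) (f : Nat → String) (m j : Nat)
    (hjm : j < m) (hj : j < b.length) (hc : c < (b.getD j []).length) :
    cellGet (colWrite b c f m) j c = f j := by
  rw [cellGet_eq, colWrite_getElem?, if_pos hjm, List.getElem?_eq_getElem hj]
  simp only [Option.map_some, Option.getD_some]
  have hc' : c < (b[j]).length := by rwa [List.getD_eq_getElem _ _ hj] at hc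
  rw [List.getElem?_set_self] <;> simp [hc']

def target (b : List (List String)) (c j : Nat) : String :=
  if j < b.length - (colVals b c).length then " "
  else (colVals b c).getD (j - (b.length - (colVals b c).length)) " "

theorem shift_down_alt_eq (board : List (List String)) (hb : board ≠ []) :
    shift_down_alt board = (List.range ((board.headD []).length)).foldl
      (fun b c => colWrite b c (fun r =>
        if r < board.length - (colVals b c).length then " "
        else (colVals b c).getD (r - (board.length - (colVals b c).length)) " ") board.length)
      board := by
  unfold shift_down_alt colWrite
  rw [if_neg hb]

theorem colList_eq_of_cells (b b' : List (List String)) (c : Nat)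
    (hlen : b'.length = b.length) (hcell : ∀ j, cellGet b' j c = cellGet b j c) :
    colList b' c = colList b c := by
  apply List.ext_getElem (by simp [colList, hlen])
  intro j hj1 hj2
  have h1 : (colList b' c)[j] = (colList b' c).getD j " " := (List.getD_eq_getElem _ _ hj1).symm
  have h2 : (colList b c)[j] = (colList b c).getD j " " := (List.getD_eq_getElem _ _ hj2).symm
  rw [h1, h2, colList_getD, colList_getD, hcell]

theorem settle_fold_char (board : List (List String)) (hpre : Pre_shift_down board) (k : Nat)
    (hk : k ≤ (board.headD []).length) :
    ((List.range k).foldl (fun b c => colWrite b c (fun r =>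
        if r < board.length - (colVals b c).length then " "
        else (colVals b c).getD (r - (board.length - (colVals b c).length)) " ") board.length)
      board).length = board.length ∧
    (∀ j, (((List.range k).foldl (fun b c => colWrite b c (fun r =>
        if r < board.length - (colVals b c).length then " "
        else (colVals b c).getD (r - (board.length - (colVals b c).length)) " ") board.length)
      board).getD j []).length = (board.getD j []).length) ∧
    (∀ j c, j < board.length → c < k → cellGet ((List.range k).foldl (fun b c => colWrite b c (fun r =>
        if r < board.length - (colVals b c).length then " "
        else (colVals b c).getD (r - (board.length - (colVals b c).length)) " ") board.length)
      board) j c = target board c j) ∧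
    (∀ j c, k ≤ c → cellGet ((List.range k).foldl (fun b c => colWrite b c (fun r =>
        if r < board.length - (colVals b c).length then " "
        else (colVals b c).getD (r - (board.length - (colVals b c).length)) " ") board.length)
      board) j c = cellGet board j c) := by
  induction k with
  | zero => exact ⟨rfl, fun j => rfl, fun j c _ h => absurd h (by omega), fun j c _ => rfl⟩
  | succ k ih =>
    obtain ⟨ih1, ih2, ih3, ih4⟩ := ih (by omega)
    set step := fun (b : List (List String)) (c : Nat) => colWrite b c (fun r =>
        if r < board.length - (colVals b c).length then " "
        else (colVals b c).getD (r - (board.length - (colVals b c).length)) " ") board.length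
      with hstep
    set Fk := (List.range k).foldl step board with hFk
    have hfold : (List.range (k+1)).foldl step board = step Fk k := by
      rw [List.range_succ, List.foldl_append, List.foldl_cons, List.foldl_nil]
    rw [hfold]
    have hvals : colVals Fk k = colVals board k := by
      rw [colVals_eq_filter, colVals_eq_filter,
        colList_eq_of_cells board Fk k ih1 (fun j => ih4 j k (le_refl k))]
    have hlen1 : (step Fk k).length = board.length := by
      rw [hstep]; simp only []
      rw [length_colWrite, ih1]
    have hrow1 : ∀ j, ((step Fk k).getD j []).length = (board.getD j []).length := by
      intro j; rw [hstep]; simp only []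
      rw [rowlen_colWrite, ih2]
    refine ⟨hlen1, hrow1, ?_, ?_⟩
    · intro j c hj hc
      rcases Nat.lt_or_ge c k with hck | hck
      · rw [hstep]; simp only []
        rw [cellGet_colWrite_ne _ _ _ _ _ _ (by omega), ih3 j c hj hck]
      · have hck' : c = k := by omega
        subst hck'
        rw [hstep]; simp only []
        have hjF : j < Fk.length := by rw [ih1]; exact hj
        have hcF : c < (Fk.getD j []).length := by
          rw [ih2 j]
          have hmem : board.getD j [] ∈ board := by
            rw [List.getD_eq_getElem _ _ hj]; exact List.getElem_mem hj
          exact lt_of_lt_of_le (by omega) (hpre _ hmem)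
        rw [cellGet_colWrite_self Fk c _ board.length j hj hjF hcF, hvals]
        unfold target
        rfl
    · intro j c hc
      rw [hstep]; simp only []
      rw [cellGet_colWrite_ne _ _ _ _ _ _ (by omega), ih4 j c (by omega)]

theorem settle_char (board : List (List String)) (hb : board ≠ []) (hpre : Pre_shift_down board) :
    (shift_down_alt board).length = board.length ∧
    (∀ j, ((shift_down_alt board).getD j []).length = (board.getD j []).length) ∧
    (∀ j c, j < board.length → c < (board.headD []).length →
      cellGet (shift_down_alt board) j c = target board c j) ∧
    (∀ j c, (board.headD []).length ≤ c →
      cellGet (shift_down_alt board) j c = cellGet board j c) := by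
  rw [shift_down_alt_eq board hb]
  exact settle_fold_char board hpre ((board.headD []).length) (le_refl _)

def noFloat (l : List String) : Prop :=
  ∀ i, i + 1 < l.length → l.getD i " " ≠ " " → l.getD (i + 1) " " ≠ " "

theorem noFloat_all_of_head (l : List String) (h : noFloat l) (hx : l.getD 0 " " ≠ " ") :
    ∀ y ∈ l, y ≠ " " := by
  induction l with
  | nil => intro y hy; cases hy
  | cons x t ih =>
    intro y hy
    rcases List.mem_cons.1 hy with rfl | hyt
    · simpa using hx
    · cases t with
      | nil => cases hyt
      | cons z t' =>
        refine ih ?_ ?_ y hyt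
        · intro i hi hne
          exact h (i + 1) (by simpa using hi) (by simpa using hne)
        · exact h 0 (by simp) hx

theorem noFloat_settled (l : List String) (h : noFloat l) :
    l = List.replicate (l.length - (l.filter (fun v => v ≠ " ")).length) " "
      ++ l.filter (fun v => v ≠ " ") := by
  induction l with
  | nil => rfl
  | cons x t ih =>
    by_cases hx : x = " "
    · subst hx
      have ht : noFloat t := by
        intro i hi hne
        exact h (i + 1) (by simpa using hi) (by simpa using hne)
      have hfl : (" " :: t).filter (fun v => v ≠ " ") = t.filter (fun v => v ≠ " ") := by
        simp
      rw [hfl]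
      have hle : (t.filter (fun v => v ≠ " ")).length ≤ t.length := List.length_filter_le _ _
      have hlen : (" " :: t).length - (t.filter (fun v => v ≠ " ")).length
          = (t.length - (t.filter (fun v => v ≠ " ")).length) + 1 := by
        simp only [List.length_cons]; omega
      rw [hlen, List.replicate_succ, List.cons_append]
      exact congrArg _ (ih ht)
    · have hall : ∀ y ∈ x :: t, y ≠ " " :=
        noFloat_all_of_head _ h (by simpa using hx)
      have hfl : (x :: t).filter (fun v => v ≠ " ") = x :: t := by
        rw [List.filter_eq_self]
        intro a ha; simpa using hall a ha
      rw [hfl]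
      simp

theorem getD_replicate_append (n : Nat) (v : List String) (j : Nat) :
    (List.replicate n " " ++ v).getD j " " = if j < n then " " else v.getD (j - n) " " := by
  split
  · rw [List.getD_eq_getElem _ _ (by simp; omega)]
    rw [List.getElem_append_left (by simpa using ‹j < n›)]
    simp
  · rw [List.getD_eq_getElem?_getD, List.getD_eq_getElem?_getD,
      List.getElem?_append_right (by simp; omega)]
    simp

theorem check_below_true_nocond (b : List (List String)) (h : check_below b = true) :
    ∀ r c, r + 1 < b.length → c < (b.headD []).length → condAt b r c = false := by
  intro r c hr hc
  by_contra hcond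
  have hcond' : condAt b r c = true := by simpa using hcond
  have : check_below b = false := (check_below_eq_false_iff b).2
    ⟨(r, c), by
      simp only [pairs, List.mem_flatMap, List.mem_map, List.mem_range]
      exact ⟨r, by omega, c, hc, rfl⟩, hcond'⟩
  rw [h] at this; cases this

theorem settled_cell (b : List (List String)) (hcb : check_below b = true)
    (j c : Nat) (_hj : j < b.length) (hc : c < (b.headD []).length) :
    cellGet b j c = target b c j := by
  have hlen : (colList b c).length = b.length := by simp [colList]
  have hnf : noFloat (colList b c) := by
    intro i hi hne
    rw [colList_getD] at hne ⊢
    have := check_below_true_nocond b hcb i c (by omega) hc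
    simp only [condAt, Bool.and_eq_false_iff, bne_eq_false_iff_eq, beq_eq_false_iff_ne] at this
    rcases this with h1 | h2
    · exact absurd h1 hne
    · exact h2
  have hsettled := noFloat_settled _ hnf
  have : cellGet b j c = (colList b c).getD j " " := (colList_getD b c j).symm
  rw [this]
  conv_lhs => rw [hsettled]
  rw [getD_replicate_append]
  unfold target
  rw [colVals_eq_filter, hlen]

theorem settled_eq_alt (b : List (List String)) (hcb : check_below b = true) (hpre : Pre_shift_down b) :
    b = shift_down_alt b := by
  by_cases hb : b = []
  · subst hb; rfl
  obtain ⟨h1, h2, h3, h4⟩ := settle_char b hb hpre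
  refine board_ext h1.symm (fun j => (h2 j).symm) (fun j c => ?_)
  rcases Nat.lt_or_ge j b.length with hj | hj
  · rcases Nat.lt_or_ge c (b.headD []).length with hc | hc
    · exact (settled_cell b hcb j c hj hc).trans (h3 j c hj hc).symm
    · exact (h4 j c hc).symm
  · rw [cellGet_default_of_ge _ _ (by omega), cellGet_default_of_ge _ _ (by rw [h1]; omega)]

theorem list_ext_getD (l1 l2 : List String) (hlen : l1.length = l2.length)
    (h : ∀ j, j < l1.length → l1.getD j " " = l2.getD j " ") : l1 = l2 :=
  List.ext_getElem hlen (fun j h1 h2 => by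
    rw [← List.getD_eq_getElem l1 " " h1, ← List.getD_eq_getElem l2 " " h2]
    exact h j h1)

theorem getD_set_self (l : List String) (i : Nat) (v : String) (h : i < l.length) :
    (l.set i v).getD i " " = v := by
  rw [List.getD_eq_getElem?_getD, List.getElem?_set_self] <;> simp [h]

theorem getD_set_ne (l : List String) (i j : Nat) (v : String) (h : i ≠ j) :
    (l.set i v).getD j " " = l.getD j " " := by
  rw [List.getD_eq_getElem?_getD, List.getElem?_set_ne h, List.getD_eq_getElem?_getD]

theorem filter_set_swap (l : List String) (r : Nat) (v : String)
    (hr : r + 1 < l.length) (hv : l.getD r " " = v) (hvne : v ≠ " ")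
    (hsp : l.getD (r + 1) " " = " ") :
    ((l.set r " ").set (r + 1) v).filter (fun x => x ≠ " ")
      = l.filter (fun x => x ≠ " ") := by
  induction r generalizing l with
  | zero =>
    match l, hr with
    | a :: b :: t, _ =>
      have ha : a = v := by simpa using hv
      have hb : b = " " := by simpa using hsp
      subst ha; subst hb
      simp [hvne]
  | succ r ih =>
    match l, hr with
    | a :: t, hr =>
      have h1 : ((a :: t).set (r + 1) " ").set (r + 2) v = a :: ((t.set r " ").set (r + 1) v) := by
        simp [List.set_cons_succ]
      rw [h1]
      simp only [List.filter_cons]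
      rw [ih t (by simpa using hr) (by simpa using hv) (by simpa using hsp)]

theorem Pre_of_shape_eq {b b' : List (List String)} (h : shape b' = shape b) (hpre : Pre_shift_down b) :
    Pre_shift_down b' := by
  intro row hrow
  obtain ⟨j, hj, rfl⟩ := List.mem_iff_getElem.1 hrow
  have hjb : j < b.length := by rw [← length_of_shape_eq h]; exact hj
  have hrl := rowlen_of_shape_eq h j
  rw [List.getD_eq_getElem _ _ hj] at hrl
  rw [headlen_of_shape_eq h, hrl]
  exact hpre _ (by rw [List.getD_eq_getElem b [] hjb]; exact List.getElem_mem hjb)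

theorem colList_passStep_ne (b : List (List String)) (r c c' : Nat) (h : c' ≠ c) :
    colList (passStep b r c) c' = colList b c' := by
  refine colList_eq_of_cells b (passStep b r c) c' (length_of_shape_eq (shape_passStep b r c)) (fun j => ?_)
  unfold passStep
  split
  · rw [cellGet_cellSet_ne _ _ (Or.inr h), cellGet_cellSet_ne _ _ (Or.inr h)]
  · rfl

theorem filtered_colList_passStep (b : List (List String)) (r c : Nat)
    (hr : r + 1 < b.length) (hc : c < (b.headD []).length) (hpre : Pre_shift_down b) :
    (colList (passStep b r c) c).filter (fun x => x ≠ " ")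
      = (colList b c).filter (fun x => x ≠ " ") := by
  by_cases hcond : condAt b r c = true
  · have hvne : cellGet b r c ≠ " " := by
      simp only [condAt, Bool.and_eq_true, bne_iff_ne, beq_iff_eq] at hcond; exact hcond.1
    have hsp : cellGet b (r + 1) c = " " := by
      simp only [condAt, Bool.and_eq_true, bne_iff_ne, beq_iff_eq] at hcond; exact hcond.2
    have hcrow : c < (b.getD r []).length := by
      by_contra hge
      apply hvne
      unfold cellGet
      rw [List.getD_eq_getElem?_getD (l := b.getD r []), List.getElem?_eq_none (by omega)]
      rfl
    have hcrow1 : c < (b.getD (r + 1) []).length := by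
      refine lt_of_lt_of_le hc (hpre _ ?_)
      rw [List.getD_eq_getElem b [] (by omega)]
      exact List.getElem_mem (by omega)
    have hstep : passStep b r c = cellSet (cellSet b r c " ") (r + 1) c (cellGet b r c) := by
      unfold passStep; rw [if_pos hcond]
    have hsh : shape (passStep b r c) = shape b := shape_passStep b r c
    have hcol : colList (passStep b r c) c
        = ((colList b c).set r " ").set (r + 1) (cellGet b r c) := by
      refine list_ext_getD _ _ (by simp [colList, length_of_shape_eq hsh]) (fun j hj => ?_)
      have hjlen : j < b.length := by
        simpa [colList, length_of_shape_eq hsh] using hj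
      have hcollen : (colList b c).length = b.length := by simp [colList]
      rw [colList_getD]
      by_cases hjr : j = r
      · subst hjr
        rw [hstep, cellGet_cellSet_ne _ _ (Or.inl (by omega)),
          cellGet_cellSet_self _ _ (by omega) hcrow,
          getD_set_ne _ _ _ _ (by omega), getD_set_self _ _ _ (by omega)]
      · by_cases hjr1 : j = r + 1
        · subst hjr1
          have hsh0 := shape_cellSet b r c " "
          rw [hstep, cellGet_cellSet_self _ _ (by rw [length_of_shape_eq hsh0]; omega)
              (by rw [rowlen_of_shape_eq hsh0]; exact hcrow1),
            getD_set_self _ _ _ (by simp only [List.length_set]; omega)]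
        · rw [hstep, cellGet_cellSet_ne _ _ (Or.inl (by omega)),
            cellGet_cellSet_ne _ _ (Or.inl (by omega)),
            getD_set_ne _ _ _ _ (by omega), getD_set_ne _ _ _ _ (by omega), colList_getD]
    rw [hcol]
    exact filter_set_swap (colList b c) r (cellGet b r c)
      (by simp only [colList, List.length_map]; omega)
      (colList_getD b c r) hvne
      ((colList_getD b c (r + 1)).trans hsp)
  · rw [passStep_eq_of_not_cond b hcond]

theorem doSwaps_colInvariant (ps : List (Nat × Nat)) (b : List (List String)) (hpre : Pre_shift_down b)
    (hps : ∀ p ∈ ps, p.1 + 1 < b.length ∧ p.2 < (b.headD []).length) :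
    (∀ c, c < (b.headD []).length →
      (colList (doSwaps ps b) c).filter (fun x => x ≠ " ")
        = (colList b c).filter (fun x => x ≠ " ")) ∧
    (∀ c, (b.headD []).length ≤ c → colList (doSwaps ps b) c = colList b c) := by
  induction ps generalizing b with
  | nil => exact ⟨fun c _ => rfl, fun c _ => rfl⟩
  | cons p ps ih =>
    have hp := hps p (by simp)
    have hsh := shape_passStep b p.1 p.2
    have hpre' : Pre_shift_down (passStep b p.1 p.2) := Pre_of_shape_eq hsh hpre
    have hps' : ∀ q ∈ ps, q.1 + 1 < (passStep b p.1 p.2).length ∧ q.2 < ((passStep b p.1 p.2).headD []).length := by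
      intro q hq
      rw [length_of_shape_eq hsh, headlen_of_shape_eq hsh]
      exact hps q (by simp [hq])
    obtain ⟨ih1, ih2⟩ := ih (passStep b p.1 p.2) hpre' hps'
    have hd : doSwaps (p :: ps) b = doSwaps ps (passStep b p.1 p.2) := rfl
    constructor
    · intro c hc
      rw [hd, ih1 c (by rw [headlen_of_shape_eq hsh]; exact hc)]
      by_cases hcp : c = p.2
      · subst hcp
        exact filtered_colList_passStep b p.1 p.2 hp.1 hc hpre
      · rw [colList_passStep_ne b p.1 p.2 c hcp]
    · intro c hc
      rw [hd, ih2 c (by rw [headlen_of_shape_eq hsh]; exact hc)]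
      exact colList_passStep_ne b p.1 p.2 c (by omega)

theorem settle_pass1 (b : List (List String)) (hpre : Pre_shift_down b) :
    shift_down_alt (pass1 b) = shift_down_alt b := by
  by_cases hb : b = []
  · subst hb; rfl
  have hbounds : ∀ q ∈ pairs b, q.1 + 1 < b.length ∧ q.2 < (b.headD []).length := by
    intro q hq
    simp only [pairs, List.mem_flatMap, List.mem_map, List.mem_range] at hq
    obtain ⟨r, hr, c, hc, rfl⟩ := hq
    exact ⟨by omega, hc⟩
  have hsh : shape (pass1 b) = shape b := by
    rw [pass1_eq_doSwaps]; exact shape_doSwaps _ _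
  have hinv := doSwaps_colInvariant (pairs b) b hpre hbounds
  rw [← pass1_eq_doSwaps] at hinv
  obtain ⟨hinv1, hinv2⟩ := hinv
  have hlen : (pass1 b).length = b.length := length_of_shape_eq hsh
  have hhead : ((pass1 b).headD []).length = (b.headD []).length := headlen_of_shape_eq hsh
  have hb' : pass1 b ≠ [] := by
    intro h0; apply hb
    have := hlen; rw [h0] at this
    exact List.length_eq_zero_iff.1 this.symm
  have hpre' : Pre_shift_down (pass1 b) := Pre_of_shape_eq hsh hpre
  obtain ⟨p1, p2, p3, p4⟩ := settle_char (pass1 b) hb' hpre'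
  obtain ⟨q1, q2, q3, q4⟩ := settle_char b hb hpre
  have hcellsame : ∀ j c, (b.headD []).length ≤ c → cellGet (pass1 b) j c = cellGet b j c := by
    intro j c hc
    rw [← colList_getD, ← colList_getD, hinv2 c hc]
  refine board_ext (by rw [p1, hlen, ← q1]) (fun j => by rw [p2 j, rowlen_of_shape_eq hsh, ← q2 j]) (fun j c => ?_)
  rcases Nat.lt_or_ge j b.length with hj | hj
  · rcases Nat.lt_or_ge c (b.headD []).length with hc | hc
    · rw [p3 j c (by omega) (by rw [hhead]; exact hc), q3 j c hj hc]
      unfold target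
      rw [colVals_eq_filter, colVals_eq_filter, hinv1 c hc, hlen]
    · rw [p4 j c (by rw [hhead]; exact hc), q4 j c hc]
      exact hcellsame j c hc
  · rw [cellGet_default_of_ge _ _ (by rw [p1, hlen]; omega),
      cellGet_default_of_ge _ _ (by rw [q1]; omega)]

theorem loop_eq_settle : ∀ (fuel : Nat) (b : List (List String)), potential b < fuel →
    Pre_shift_down b → shiftLoop fuel b = shift_down_alt b := by
  intro fuel
  induction fuel with
  | zero => intro b hpot _; omega
  | succ fuel ih =>
    intro b hpot hpre
    rw [shiftLoop]
    by_cases h : check_below b = true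
    · rw [if_pos h]
      exact settled_eq_alt b h hpre
    · rw [if_neg h]
      rw [ih (pass1 b) (by have := pass1_potential_lt b h; omega)
        (Pre_of_shape_eq (by rw [pass1_eq_doSwaps]; exact shape_doSwaps _ _) hpre)]
      exact settle_pass1 b hpre

-- ===== VERDICT (by name: the statement is the Claim_ definition above) =====
theorem shift_down_spec : Claim_equal_shift_down := by
  intro board _ hpre
  unfold Spec_shift_down shift_down
  exact loop_eq_settle (potential board + 1) board (by omega) hpre
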